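-- pv_equiv track=rewrite | github.com/T-Srikanth/DSML | A14.py | solve
-- ===== SOURCE A (Python) =====
-- def solve(A):
--   inputSize = len(A)
--   A.sort()
--   start = A[0]
--   for i in range(inputSize):
--     if (start != A[i]) and (start == (inputSize - i)):
--       return 1
--     start = A[i]
--   if start == 0:
--     return 1
--   return -1
-- ===== SOURCE B (Python) =====
-- def solve(A):
--     A.sort()
--     counts = {}
--     for x in A:
--         counts[x] = counts.get(x, 0) + 1
--     greater = 0
--     for v in sorted(counts, reverse=True):
--         if v == greater:
--             return 1
--         greater += counts[v]
--     return -1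
-- ===== Notes on version B (the rewrite author's own statement) =====
-- stated objective: alternative
-- what changed: B replaces A's implicit index arithmetic (comparing each sorted value to n-i plus a trailing check of the last value) by a dict of value counts and one descending walk over the distinct values maintaining an explicit running count of strictly greater elements.
import Mathlib
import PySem

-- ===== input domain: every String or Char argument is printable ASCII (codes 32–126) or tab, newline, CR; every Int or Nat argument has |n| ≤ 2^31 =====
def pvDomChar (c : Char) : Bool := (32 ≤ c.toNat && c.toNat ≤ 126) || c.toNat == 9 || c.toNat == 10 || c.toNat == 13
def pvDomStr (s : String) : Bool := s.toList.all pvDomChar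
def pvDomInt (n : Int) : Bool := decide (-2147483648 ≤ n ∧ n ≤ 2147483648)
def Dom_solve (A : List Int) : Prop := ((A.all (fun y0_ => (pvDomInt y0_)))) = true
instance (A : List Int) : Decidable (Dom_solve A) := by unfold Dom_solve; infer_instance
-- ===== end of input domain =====

-- B replaces A's implicit n-i index arithmetic on the sorted list by an explicit greater-count over
-- distinct values counted once in a dict (objective: alternative). A sorts its argument in place; B
-- performs the same mutation; the equivalence proved here is about the return value.

-- ===== PORT A =====
-- the for-loop of A: remaining suffix, previous value `start`, k = inputSize - i
def solveAux : List Int → Int → Int → Int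
  | [], start, _ => if start = 0 then 1 else -1
  | a :: rest, start, k =>
      if start ≠ a ∧ start = k then 1 else solveAux rest a (k - 1)

def solve (A : List Int) : Int :=
  let s := PySem.List.sorted A (fun x => x) false
  match PySem.List.pyGet? s 0 with
  | none => 0   -- A[0] raises IndexError here (empty list); excluded by Pre_solve
  | some st => solveAux s st (s.length : Int)

-- ===== PORT B =====
-- the second for-loop of B: remaining distinct values (descending), running greater-count
def altLoop (counts : PySem.Dict Int Int) : List Int → Int → Int
  | [], _ => -1
  | v :: rest, greater =>
      if v = greater then 1 else altLoop counts rest (greater + counts.getD v 0)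

def solve_alt (A : List Int) : Int :=
  let s := PySem.List.sorted A (fun x => x) false
  let counts := s.foldl (fun d x => d.insert x (d.getD x 0 + 1)) PySem.Dict.empty
  altLoop counts (PySem.List.sorted counts.keys (fun x => x) true) 0

-- ===== PRECONDITION & SPEC =====
-- Pre_ excludes only the empty list, on which A raises IndexError at A[0].
def Pre_solve (A : List Int) : Prop := A ≠ []
instance (A : List Int) : Decidable (Pre_solve A) := by unfold Pre_solve; infer_instance
def pvWitness_solve : List Int := ([3, 1, 2, 1])

def Spec_solve (A : List Int) (out : Int) : Prop := out = solve_alt A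
instance (A : List Int) (out : Int) : Decidable (Spec_solve A out) := by unfold Spec_solve; infer_instance

-- ===== CLAIM (what is proved, stated in full; the proofs are below) =====
def Claim_equal_solve : Prop := ∀ (A : List Int), Dom_solve A → Pre_solve A → Spec_solve A (solve A)

-- ===== LEMMAS AND PROOFS =====

-- number of elements of s strictly greater than v, as an Int
def gcnt (s : List Int) (v : Int) : Int := ((s.countP (fun x => decide (v < x)) : Nat) : Int)

theorem count_filter' (l : List Int) (p : Int → Bool) (x : Int) :
    List.count x (l.filter p) = if p x then List.count x l else 0 := by
  by_cases hpx : p x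
  · simp [hpx, List.count_filter hpx]
  · simp only [hpx, if_false, Bool.false_eq_true]
    refine List.count_eq_zero_of_not_mem ?_
    simp [List.mem_filter, hpx]

theorem sum_indicator (l : List Int) (x : Int) :
    ((l.map (fun u => if u = x then (1:Int) else 0)).sum) = ((List.count x l : Nat) : Int) := by
  rw [show (fun u => if u = x then (1:Int) else 0) = (fun u => if (u == x) then (1:Int) else 0) by funext u; simp]
  rw [PySem.List.sum_map_ite_one_zero]
  simp [List.count]

-- the initial invariant: over nodup keys covering s, the counts of the greater keys sum to gcnt
theorem gcnt_eq_sum (ks : List Int) (hnd : ks.Nodup) (v : Int) : ∀ (s : List Int),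
    (∀ x ∈ s, x ∈ ks) →
    gcnt s v = (((ks.filter (fun u => decide (v < u))).map (fun u => (s.count u : Int))).sum) := by
  intro s
  induction s with
  | nil => intro _; simp [gcnt]
  | cons x t ih =>
    intro hmem
    have hx : x ∈ ks := hmem x (by simp)
    have hrec := ih (fun y hy => hmem y (List.mem_cons_of_mem _ hy))
    have hmap : ((ks.filter (fun u => decide (v < u))).map (fun u => (List.count u (x :: t) : Int)))
        = ((ks.filter (fun u => decide (v < u))).map (fun u => (List.count u t : Int) + (if u = x then (1:Int) else 0))) := by
      apply List.map_congr_left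
      intro u _
      rw [List.count_cons]
      by_cases h : u = x
      · simp [h]
      · simp [h, Ne.symm h]
    have hind : ((ks.filter (fun u => decide (v < u))).map (fun u => if u = x then (1:Int) else 0)).sum
        = if decide (v < x) = true then (1:Int) else 0 := by
      rw [sum_indicator, count_filter']
      by_cases h : v < x
      · simp [h, List.count_eq_one_of_mem hnd hx]
      · simp [h]
    rw [hmap, List.sum_map_add, hind, ← hrec]
    simp only [gcnt, List.countP_cons]
    by_cases h : v < x
    · simp [h]
    · simp [h]

-- gcnt ignores a prefix element ≤ v
theorem gcnt_cons_of_le (l : List Int) (b v : Int) (h : b ≤ v) : gcnt (b :: l) v = gcnt l v := by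
  simp [gcnt, not_lt.mpr h]

-- A's loop on a sorted suffix decides "some value equals its strictly-greater count"
theorem solveAux_eq (xs : List Int) : ∀ (start : Int),
    (start :: xs).Pairwise (· ≤ ·) →
    solveAux xs start (xs.length : Int) =
      if ∃ v ∈ start :: xs, v = gcnt (start :: xs) v then 1 else -1 := by
  induction xs with
  | nil =>
    intro start _
    by_cases h : start = 0
    · simp [solveAux, h, gcnt]
    · simp only [solveAux, if_neg h]
      rw [if_neg]
      rintro ⟨v, hv, heq⟩
      simp only [List.mem_singleton] at hv
      subst hv
      simp [gcnt] at heq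
      exact h heq
  | cons a rest ih =>
    intro start hp
    have hsa : start ≤ a := (List.pairwise_cons.mp hp).1 a (by simp)
    have hax : ∀ y ∈ rest, a ≤ y := (List.pairwise_cons.mp (List.Pairwise.of_cons hp)).1
    have hstart_le : ∀ y ∈ a :: rest, start ≤ y := (List.pairwise_cons.mp hp).1
    have hklen : ((a :: rest).length : Int) - 1 = (rest.length : Int) := by
      simp [List.length_cons]
    have hstep : solveAux (a :: rest) start ((a :: rest).length : Int)
        = if start ≠ a ∧ start = ((a :: rest).length : Int) then 1
          else solveAux rest a ((rest.length : Int)) := by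
      simp only [solveAux, hklen]
    rw [hstep, ih a (List.Pairwise.of_cons hp)]
    -- gcnt over the full list = gcnt over the tail, for values in the tail
    have hdrop : ∀ v ∈ a :: rest, gcnt (start :: a :: rest) v = gcnt (a :: rest) v :=
      fun v hv => gcnt_cons_of_le _ _ _ (hstart_le v hv)
    have hfull : start < a → gcnt (a :: rest) start = ((a :: rest).length : Int) := by
      intro hlt
      have : (a :: rest).countP (fun x => decide (start < x)) = (a :: rest).length := by
        apply List.countP_eq_length.mpr
        intro y hy
        rcases List.mem_cons.mp hy with rfl | hy'
        · simpa using hlt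
        · simpa using lt_of_lt_of_le hlt (hax y hy')
      simp [gcnt, this]
    by_cases hc : start ≠ a ∧ start = ((a :: rest).length : Int)
    · rw [if_pos hc]
      have hlt : start < a := lt_of_le_of_ne hsa hc.1
      have : start = gcnt (start :: a :: rest) start := by
        rw [gcnt_cons_of_le _ _ _ (le_refl start), hfull hlt]
        exact hc.2
      rw [if_pos ⟨start, by simp, this⟩]
    · rw [if_neg hc]
      congr 1
      apply propext
      constructor
      · rintro ⟨v, hv, heq⟩
        refine ⟨v, List.mem_cons_of_mem _ hv, ?_⟩
        rw [hdrop v hv]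
        exact heq
      · rintro ⟨v, hv, heq⟩
        rcases List.mem_cons.mp hv with h1 | hv'
        · rw [h1] at heq
          rw [gcnt_cons_of_le _ _ _ (le_refl start)] at heq
          by_cases heqa : start = a
          · exact ⟨a, by simp, by rw [← heqa]; rw [← heqa] at heq; exact heq⟩
          · have hlt : start < a := lt_of_le_of_ne hsa heqa
            rw [hfull hlt] at heq
            exact absurd ⟨heqa, heq⟩ hc
        · refine ⟨v, hv', ?_⟩
          rw [← hdrop v hv']
          exact heq

-- B's loop decides the same predicate over the remaining keys
theorem altLoop_eq (s : List Int) (ks : List Int) : ∀ (greater : Int),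
    ks.Pairwise (· > ·) →
    (∀ v ∈ ks, gcnt s v = greater +
      (((ks.filter (fun u => decide (v < u))).map (fun u => (List.count u s : Int))).sum)) →
    altLoop (PySem.Dict.counter s) ks greater =
      if ∃ v ∈ ks, v = gcnt s v then 1 else -1 := by
  induction ks with
  | nil => intro g _ _; simp [altLoop]
  | cons v1 rest ih =>
    intro g hpw hinv
    have hrestlt : ∀ u ∈ rest, u < v1 := (List.pairwise_cons.mp hpw).1
    have hg1 : gcnt s v1 = g := by
      have h := hinv v1 (by simp)
      have hfilt : (v1 :: rest).filter (fun u => decide (v1 < u)) = [] := by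
        apply List.filter_eq_nil_iff.mpr
        intro u hu
        rcases List.mem_cons.mp hu with rfl | hu'
        · simp
        · simpa using not_lt.mpr (le_of_lt (hrestlt u hu'))
      rw [hfilt] at h
      simpa using h
    by_cases hv : v1 = g
    · have : v1 = gcnt s v1 := by rw [hg1]; exact hv
      simp only [altLoop, if_pos hv]
      rw [if_pos ⟨v1, by simp, this⟩]
    · have hne : ¬ v1 = gcnt s v1 := by rw [hg1]; exact hv
      simp only [altLoop, if_neg hv]
      have hgetD : (PySem.Dict.counter s).getD v1 0 = (List.count v1 s : Int) :=
        PySem.Dict.getD_counter s v1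
      have hinv' : ∀ v ∈ rest, gcnt s v = (g + (PySem.Dict.counter s).getD v1 0) +
          (((rest.filter (fun u => decide (v < u))).map (fun u => (List.count u s : Int))).sum) := by
        intro v hvmem
        have h := hinv v (List.mem_cons_of_mem _ hvmem)
        have hvlt : v < v1 := hrestlt v hvmem
        rw [List.filter_cons] at h
        simp only [hvlt, decide_true, if_true] at h
        rw [List.map_cons, List.sum_cons] at h
        rw [hgetD]
        omega
      rw [ih (g + (PySem.Dict.counter s).getD v1 0) (List.Pairwise.of_cons hpw) hinv']
      congr 1
      apply propext
      constructor
      · rintro ⟨v, hvm, heq⟩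
        exact ⟨v, List.mem_cons_of_mem _ hvm, heq⟩
      · rintro ⟨v, hvm, heq⟩
        rcases List.mem_cons.mp hvm with h1 | hvm'
        · rw [h1] at heq
          exact absurd heq hne
        · exact ⟨v, hvm', heq⟩


-- ===== VERDICT (by name: the statement is the Claim_ definition above) =====
theorem solve_spec : Claim_equal_solve := by
  intro A _ hpre
  unfold Spec_solve solve solve_alt
  have hsne : PySem.List.sorted A (fun x => x) false ≠ [] := by
    intro h
    exact hpre ((PySem.List.sorted_eq_nil_iff A (fun x => x) false).mp h)
  obtain ⟨st, tail, hst⟩ : ∃ st tail, PySem.List.sorted A (fun x => x) false = st :: tail := by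
    cases h : PySem.List.sorted A (fun x => x) false with
    | nil => exact absurd h hsne
    | cons a l => exact ⟨a, l, rfl⟩
  have hsorted : (st :: tail).Pairwise (· ≤ ·) := by
    rw [← hst]; exact PySem.List.sorted_pairwise A (fun x => x) 
  simp only [hst]
  -- A side
  have hA : (match PySem.List.pyGet? (st :: tail) 0 with
      | none => (0 : Int)
      | some s0 => solveAux (st :: tail) s0 ((st :: tail).length : Int))
      = if ∃ v ∈ st :: tail, v = gcnt (st :: tail) v then 1 else -1 := by
    have hget : PySem.List.pyGet? (st :: tail) (0 : Int) = some st := by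
      simp [PySem.List.pyGet?, PySem.List.pyIdx?]
    rw [hget]
    dsimp only
    have hunfold : solveAux (st :: tail) st ((st :: tail).length : Int)
        = solveAux tail st ((tail.length : Int)) := by
      simp [solveAux]
    rw [hunfold]
    exact solveAux_eq tail st hsorted
  rw [hA]
  -- B side
  have hcounter : (st :: tail).foldl (fun d x => d.insert x (d.getD x 0 + 1)) PySem.Dict.empty
      = PySem.Dict.counter (st :: tail) := PySem.Dict.foldl_insert_getD_add_one_eq_counter _
  rw [hcounter, PySem.Dict.keys_counter]
  set ks := PySem.List.sorted (PySem.Set.ofList (st :: tail)) (fun x => x) true with hks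
  have hksnd : ks.Nodup := by
    rw [hks]
    exact (PySem.List.sorted_perm _ _ _).nodup_iff.mpr (PySem.Set.nodup_ofList _)
  have hkspw : ks.Pairwise (· > ·) := by
    have h1 : ks.Pairwise (fun a b => b ≤ a) := PySem.List.sorted_pairwise_rev _ _
    exact (h1.and hksnd).imp (fun h => lt_of_le_of_ne h.1 (Ne.symm h.2))
  have hksmem : ∀ x, x ∈ ks ↔ x ∈ st :: tail := by
    intro x
    rw [hks, PySem.List.mem_sorted, PySem.Set.mem_ofList]
  have hinv0 : ∀ v ∈ ks, gcnt (st :: tail) v = 0 +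
      (((ks.filter (fun u => decide (v < u))).map (fun u => (List.count u (st :: tail) : Int))).sum) := by
    intro v _
    rw [zero_add]
    exact gcnt_eq_sum ks hksnd v (st :: tail) (fun x hx => (hksmem x).mpr hx)
  rw [altLoop_eq (st :: tail) ks 0 hkspw hinv0]
  congr 1
  apply propext
  constructor
  · rintro ⟨v, hv, heq⟩; exact ⟨v, (hksmem v).mpr hv, heq⟩
  · rintro ⟨v, hv, heq⟩; exact ⟨v, (hksmem v).mp hv, heq⟩
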